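-- pv_equiv track=rewrite | github.com/Markyriott/collegestuff | codePath/Unit7/Session2/StandardB/p4.py | bin_sum_search
-- ===== SOURCE A (Python) =====
-- def bin_sum_search(i,arr,left,right,target,curr_max):
-- 	if left > right:
-- 		return curr_max
--
-- 	mid = (left + right) // 2
--
-- 	if arr[i] + arr[mid] < target:
-- 		return bin_sum_search(i,arr,mid+1,right,target,max(curr_max,arr[i]+arr[mid]))
-- 	else:
-- 		return bin_sum_search(i,arr,left,mid -1, target, curr_max)
-- ===== SOURCE B (Python) =====
-- def bin_sum_search(i, arr, left, right, target, curr_max):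
--     best = curr_max
--     lo, hi = left, right
--     while lo <= hi:
--         mid = (lo + hi) // 2
--         s = arr[i] + arr[mid]
--         if s < target:
--             if s > best:
--                 best = s
--             lo = mid + 1
--         else:
--             hi = mid - 1
--     return best
-- ===== Notes on version B (the rewrite author's own statement) =====
-- stated objective: idiomatic
-- what changed: The tail recursion threading curr_max through call arguments is replaced by an iterative while-loop with local lo/hi/best state and an explicit comparison instead of max().
-- outside the precondition, e.g. on bin_sum_search(0, [0, 0], 0, 3, 0, 7): A returns 7, B returns 7
import Mathlib
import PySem

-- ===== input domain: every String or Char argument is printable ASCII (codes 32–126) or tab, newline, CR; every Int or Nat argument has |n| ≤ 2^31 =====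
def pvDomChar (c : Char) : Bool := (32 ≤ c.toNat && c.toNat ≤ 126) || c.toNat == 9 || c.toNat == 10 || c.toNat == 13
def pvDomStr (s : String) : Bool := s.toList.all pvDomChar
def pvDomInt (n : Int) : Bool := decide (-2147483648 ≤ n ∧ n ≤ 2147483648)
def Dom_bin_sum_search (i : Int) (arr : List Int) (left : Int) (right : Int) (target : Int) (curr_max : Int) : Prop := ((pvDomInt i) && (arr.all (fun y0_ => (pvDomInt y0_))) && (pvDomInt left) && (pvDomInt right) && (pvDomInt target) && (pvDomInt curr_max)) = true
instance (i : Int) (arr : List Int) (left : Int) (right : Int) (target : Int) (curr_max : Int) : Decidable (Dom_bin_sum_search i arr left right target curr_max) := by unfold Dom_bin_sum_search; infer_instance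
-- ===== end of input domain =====

-- B replaces A's tail recursion (curr_max threaded through call arguments, max() at the call site)
-- by an iterative while-loop over local lo/hi/best state; same values, no speed claim.

-- ===== PORT A =====
-- literal port of A's tail recursion; arr[·] is PySem.List.pyGetD (Pre_ keeps every access in range)
def bin_sum_search (i : Int) (arr : List Int) (left : Int) (right : Int) (target : Int) (curr_max : Int) : Int :=
  if left > right then curr_max
  else
    let mid := PySem.Int.floordiv (left + right) 2
    if PySem.List.pyGetD arr i 0 + PySem.List.pyGetD arr mid 0 < target then
      bin_sum_search i arr (mid + 1) right target (max curr_max (PySem.List.pyGetD arr i 0 + PySem.List.pyGetD arr mid 0))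
    else
      bin_sum_search i arr left (mid - 1) target curr_max
termination_by (right - left + 1).toNat
decreasing_by
  · have h := PySem.Int.floordiv_two_mid_bounds (lo := left) (hi := right) (by omega)
    omega
  · have h := PySem.Int.floordiv_two_mid_bounds (lo := left) (hi := right) (by omega)
    omega

-- ===== PORT B =====
-- the while-loop of Source B: state (lo, hi, best), explicit comparison instead of max()
def binSumLoop (i : Int) (arr : List Int) (target : Int) (lo : Int) (hi : Int) (best : Int) : Int :=
  if lo ≤ hi then
    let mid := PySem.Int.floordiv (lo + hi) 2
    let s := PySem.List.pyGetD arr i 0 + PySem.List.pyGetD arr mid 0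
    if s < target then
      binSumLoop i arr target (mid + 1) hi (if s > best then s else best)
    else
      binSumLoop i arr target lo (mid - 1) best
  else best
termination_by (hi - lo + 1).toNat
decreasing_by
  · have h := PySem.Int.floordiv_two_mid_bounds (lo := lo) (hi := hi) (by omega)
    omega
  · have h := PySem.Int.floordiv_two_mid_bounds (lo := lo) (hi := hi) (by omega)
    omega

def bin_sum_search_alt (i : Int) (arr : List Int) (left : Int) (right : Int) (target : Int) (curr_max : Int) : Int :=
  binSumLoop i arr target left right curr_max

-- ===== PRECONDITION & SPEC =====
-- Pre_ admits every call that returns at once (left > right: no index is ever read) and every call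
-- whose whole search window and i lie in Python's valid (wrapped) index range [-len, len); it excludes
-- inputs where an index lookup could fall outside that range — on a few such inputs A still returns
-- (the data happens to keep the search in range), so Pre_ is conservatively narrower there.
def Pre_bin_sum_search (i : Int) (arr : List Int) (left : Int) (right : Int) (target : Int) (curr_max : Int) : Prop :=
  left > right ∨
    (PySem.Raise.InRange arr.length i ∧ -(arr.length : Int) ≤ left ∧ right < (arr.length : Int))
instance (i : Int) (arr : List Int) (left : Int) (right : Int) (target : Int) (curr_max : Int) : Decidable (Pre_bin_sum_search i arr left right target curr_max) := by unfold Pre_bin_sum_search; infer_instance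

def pvWitness_bin_sum_search : Int × List Int × Int × Int × Int × Int := (0, [1, 2, 3], 0, 2, 10, -100)

def Spec_bin_sum_search (i : Int) (arr : List Int) (left : Int) (right : Int) (target : Int) (curr_max : Int) (out : Int) : Prop := out = bin_sum_search_alt i arr left right target curr_max
instance (i : Int) (arr : List Int) (left : Int) (right : Int) (target : Int) (curr_max : Int) (out : Int) : Decidable (Spec_bin_sum_search i arr left right target curr_max out) := by unfold Spec_bin_sum_search; infer_instance

-- ===== CLAIM (what is proved, stated in full; the proofs are below) =====
def Claim_equal_bin_sum_search : Prop := ∀ (i : Int) (arr : List Int) (left : Int) (right : Int) (target : Int) (curr_max : Int), Dom_bin_sum_search i arr left right target curr_max → Pre_bin_sum_search i arr left right target curr_max → Spec_bin_sum_search i arr left right target curr_max (bin_sum_search i arr left right target curr_max)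

-- ===== LEMMAS AND PROOFS =====

-- A's recursion and B's loop agree for every window and accumulator (no precondition needed:
-- both ports read through pyGetD with the same default, so their states stay identical).
theorem bin_sum_search_eq_loop (i : Int) (arr : List Int) (target : Int) :
    ∀ (n : ℕ) (left right curr_max : Int), (right - left + 1).toNat = n →
      bin_sum_search i arr left right target curr_max = binSumLoop i arr target left right curr_max := by
  intro n
  induction n using Nat.strong_induction_on with
  | _ n ih =>
    intro left right curr_max hn
    rw [bin_sum_search, binSumLoop]
    by_cases h : left > right
    · simp [h, not_le.mpr h]
    · have hle : left ≤ right := not_lt.mp h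
      have hmid := PySem.Int.floordiv_two_mid_bounds (lo := left) (hi := right) hle
      simp only [if_neg h, if_pos hle]
      set mid := PySem.Int.floordiv (left + right) 2 with hm
      set s := PySem.List.pyGetD arr i 0 + PySem.List.pyGetD arr mid 0 with hs
      by_cases hlt : s < target
      · simp only [if_pos hlt]
        have : max curr_max s = if s > curr_max then s else curr_max := by
          rcases lt_or_ge curr_max s with h' | h'
          · simp [max_eq_right h'.le, h']
          · simp [max_eq_left h', not_lt.mpr h']
        rw [this]
        exact ih ((right - (mid + 1) + 1).toNat) (by omega) _ _ _ rfl
      · simp only [if_neg hlt]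
        exact ih ((mid - 1 - left + 1).toNat) (by omega) _ _ _ rfl

-- ===== VERDICT (by name: the statement is the Claim_ definition above) =====
theorem bin_sum_search_spec : Claim_equal_bin_sum_search := by
  intro i arr left right target curr_max _ _
  unfold Spec_bin_sum_search bin_sum_search_alt
  exact bin_sum_search_eq_loop i arr target _ left right curr_max rfl
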